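-- pv_equiv track=rewrite | github.com/Ahtezazahsan/i221927_i222046 | pcy_consumer.py | hashing_buckets
-- ===== SOURCE A (Python) =====
-- from itertools import combinations
--
-- def hashing_buckets(count_of_bucket, baskets, threshold):
--     buckets = [0] * count_of_bucket
--     for basket in baskets:
--         for i, j in combinations(basket, 2):
--             index = (i + j) % count_of_bucket
--             buckets[index] += 1
--     frequent_buckets = set([i for i, v in enumerate(buckets) if v >= threshold])
--     return frequent_buckets
-- ===== SOURCE B (Python) =====
-- def hashing_buckets(count_of_bucket, baskets, threshold):
--     # Histogram algorithm: count each residue class once per basket, then add the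
--     # class-pair products (and n*(n-1)//2 on the diagonal) instead of enumerating pairs.
--     m = count_of_bucket
--     buckets = [0] * m
--     for basket in baskets:
--         h = {}
--         for v in basket:
--             r = v % m
--             h[r] = h.get(r, 0) + 1
--         items = list(h.items())
--         while items:
--             a, ca = items[0]
--             items = items[1:]
--             buckets[(2 * a) % m] += ca * (ca - 1) // 2
--             for c, cc in items:
--                 buckets[(a + c) % m] += ca * cc
--     return {i for i, v in enumerate(buckets) if v >= threshold}
-- ===== Notes on version B (the rewrite author's own statement) =====
-- stated objective: faster
-- what changed: Replaces the per-basket enumeration of all element pairs with a per-basket residue histogram (a dict) followed by pair counting between residue classes (products of class counts, n*(n-1)//2 on the diagonal), so cost depends on distinct residues, not on basket length squared.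
-- outside the precondition, e.g. on hashing_buckets(-1, [[5]], 1): A returns set(), B raises IndexError; on hashing_buckets(0, [[5]], 1): A returns set(), B raises ZeroDivisionError
import Mathlib
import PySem

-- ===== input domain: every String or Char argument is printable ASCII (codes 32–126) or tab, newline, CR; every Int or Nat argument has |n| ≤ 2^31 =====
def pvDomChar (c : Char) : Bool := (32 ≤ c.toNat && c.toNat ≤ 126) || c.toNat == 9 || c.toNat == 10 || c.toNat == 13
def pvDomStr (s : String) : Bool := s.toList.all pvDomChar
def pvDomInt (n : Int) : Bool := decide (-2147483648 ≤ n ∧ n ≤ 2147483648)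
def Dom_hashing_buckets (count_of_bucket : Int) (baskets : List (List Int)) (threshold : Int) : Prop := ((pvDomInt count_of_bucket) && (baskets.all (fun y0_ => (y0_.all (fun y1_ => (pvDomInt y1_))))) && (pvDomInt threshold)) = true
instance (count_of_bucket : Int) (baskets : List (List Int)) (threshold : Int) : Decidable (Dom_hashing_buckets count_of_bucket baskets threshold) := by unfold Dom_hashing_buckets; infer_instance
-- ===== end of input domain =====

-- B replaces A's per-basket enumeration of all element pairs by a per-basket residue
-- histogram plus a convolution per bucket (ordered pairs minus self-pairs, halved);
-- equivalence is proved on Pre_hashing_buckets (the inputs where both Pythons return).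

-- shared low-level helper: buckets[idx] += k  (Python list read + write at an Int index)
def pvAddAt (bs : List Int) (idx k : Int) : List Int :=
  PySem.List.pySetD bs idx (PySem.List.pyGetD bs idx 0 + k)

-- ===== PORT A =====
def hashing_buckets (count_of_bucket : Int) (baskets : List (List Int)) (threshold : Int) : List Int :=
  let buckets := baskets.foldl (fun bs basket =>
    (PySem.List.combinations basket 2).foldl (fun b c =>
      match c with
      | [i, j] => pvAddAt b (PySem.Int.mod (i + j) count_of_bucket) 1
      | _ => b) bs) (List.replicate count_of_bucket.toNat 0)
  -- enumerate(buckets): exact via zipIdx (stack-safe form)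
  PySem.Set.ofList (((buckets.zipIdx.map (fun p => ((p.2 : Int), p.1))).filter
      (fun iv => threshold ≤ iv.2)).map (fun iv => iv.1))

-- ===== PORT B =====
-- while-loop over the residue-class items ported as the structural recursion pvPairsLoop
def pvPairsLoop (m : Int) : List (Int × Int) → List Int → List Int
  | [], buckets => buckets
  | (a, ca) :: items, buckets =>
      pvPairsLoop m items
        (items.foldl (fun b p => pvAddAt b (PySem.Int.mod (a + p.1) m) (ca * p.2))
          (pvAddAt buckets (PySem.Int.mod (2 * a) m) (PySem.Int.floordiv (ca * (ca - 1)) 2)))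

def hashing_buckets_alt (count_of_bucket : Int) (baskets : List (List Int)) (threshold : Int) : List Int :=
  let totals := baskets.foldl (fun buckets basket =>
    pvPairsLoop count_of_bucket
      (PySem.Dict.items (basket.foldl
        (fun h v => PySem.Dict.modify h (PySem.Int.mod v count_of_bucket) 0 (· + 1))
        PySem.Dict.empty))
      buckets) (List.replicate count_of_bucket.toNat 0)
  -- enumerate(totals): exact via zipIdx (stack-safe form)
  PySem.Set.ofList (((totals.zipIdx.map (fun p => ((p.2 : Int), p.1))).filter
      (fun iv => threshold ≤ iv.2)).map (fun iv => iv.1))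

-- ===== PRECONDITION & SPEC =====
-- Pre_ excludes the inputs where one of the Pythons raises: count_of_bucket ≤ 0 with any pair
-- in a basket makes A raise (ZeroDivisionError / IndexError), and count_of_bucket ≤ 0 with any
-- nonempty basket makes B's histogram step raise; it keeps count_of_bucket ≤ 0 only when every
-- basket is empty (both return the empty set there).
def Pre_hashing_buckets (count_of_bucket : Int) (baskets : List (List Int)) (threshold : Int) : Prop :=
  0 < count_of_bucket ∨ (count_of_bucket ≤ 0 ∧ ∀ b ∈ baskets, b = [])
instance (count_of_bucket : Int) (baskets : List (List Int)) (threshold : Int) : Decidable (Pre_hashing_buckets count_of_bucket baskets threshold) := by unfold Pre_hashing_buckets; infer_instance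

def pvWitness_hashing_buckets : Int × List (List Int) × Int := (3, [[1, 2, 4]], 1)

def Spec_hashing_buckets (count_of_bucket : Int) (baskets : List (List Int)) (threshold : Int) (out : List Int) : Prop := out = hashing_buckets_alt count_of_bucket baskets threshold
instance (count_of_bucket : Int) (baskets : List (List Int)) (threshold : Int) (out : List Int) : Decidable (Spec_hashing_buckets count_of_bucket baskets threshold out) := by unfold Spec_hashing_buckets; infer_instance

-- ===== CLAIM (what is proved, stated in full; the proofs are below) =====
def Claim_equal_hashing_buckets : Prop := ∀ (count_of_bucket : Int) (baskets : List (List Int)) (threshold : Int), Dom_hashing_buckets count_of_bucket baskets threshold → Pre_hashing_buckets count_of_bucket baskets threshold → Spec_hashing_buckets count_of_bucket baskets threshold (hashing_buckets count_of_bucket baskets threshold)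

-- ===== LEMMAS AND PROOFS =====

-- counting abstractions
def pvCP (m : Int) (P : List Int) (v t : Int) : Int := (P.countP (fun x => (v + x) % m == t) : Int)
def pvSelf (m : Int) (P : List Int) (t : Int) : Int := (P.countP (fun v => (2 * v) % m == t) : Int)
def pvN (m : Int) : List Int → Int → Int
  | [], _ => 0
  | x :: xs, t => pvCP m xs x t + pvN m xs t

-- named per-basket steps (in emod/ediv form)
def stA (m : Int) (bs basket : List Int) : List Int :=
  (PySem.List.combinations basket 2).foldl (fun b c =>
    match c with
    | [i, j] => pvAddAt b ((i + j) % m) 1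
    | _ => b) bs

-- B-side per-basket step, named for the proofs
def stB (m : Int) (tot basket : List Int) : List Int :=
  pvPairsLoop m
    (PySem.Dict.items (basket.foldl
      (fun h v => PySem.Dict.modify h (PySem.Int.mod v m) 0 (· + 1)) PySem.Dict.empty))
    tot

lemma pvAddAt_length (bs : List Int) (idx k : Int) : (pvAddAt bs idx k).length = bs.length := by
  unfold pvAddAt PySem.List.pySetD PySem.List.pySet?
  cases h : PySem.List.pyIdx? bs.length idx <;> simp

lemma pvFoldLen {α : Type} (l : List α) (f : List Int → α → List Int)
    (h : ∀ bs x, (f bs x).length = bs.length) :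
    ∀ bs : List Int, (l.foldl f bs).length = bs.length := by
  induction l with
  | nil => intro bs; rfl
  | cons x xs ih => intro bs; rw [List.foldl_cons, ih, h]

lemma pvAddAt_eq (bs : List Int) (idx k : Int) (h0 : 0 ≤ idx) (h1 : idx.toNat < bs.length) :
    pvAddAt bs idx k = bs.set idx.toNat (bs.getD idx.toNat 0 + k) := by
  unfold pvAddAt
  rw [PySem.List.pyGetD_of_nonneg _ _ h0]
  unfold PySem.List.pySetD
  rw [show idx = ((idx.toNat : Nat) : Int) from (Int.toNat_of_nonneg h0).symm,
      PySem.List.pySet?_natCast bs idx.toNat _ h1]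
  simp
  congr 1
  omega

lemma pvGetD_set (bs : List Int) (n : Nat) (v : Int) (j : Nat) :
    (bs.set n v).getD j 0 = if j = n ∧ n < bs.length then v else bs.getD j 0 := by
  simp only [List.getD_eq_getElem?_getD, List.getElem?_set]
  rcases eq_or_ne j n with rfl | hne
  · by_cases h2 : j < bs.length
    · simp [h2]
    · simp [h2]
  · simp [hne, Ne.symm hne]

lemma pvCP_nil (m v t : Int) : pvCP m [] v t = 0 := by simp [pvCP]

-- A-side: the inner fold over the pairs (x, y) for y ∈ xs
lemma a_inner {m : Int} (hm : 0 < m) {t : Int} (ht0 : 0 ≤ t) (ht : t < m) (x : Int) :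
    ∀ (xs : List Int) (bs : List Int), bs.length = m.toNat →
      (xs.foldl (fun b y => pvAddAt b ((x + y) % m) 1) bs).getD t.toNat 0
        = bs.getD t.toNat 0 + pvCP m xs x t := by
  intro xs
  induction xs with
  | nil => intro bs _; simp [pvCP_nil]
  | cons y ys ih =>
    intro bs hb
    have hmne : m ≠ 0 := by omega
    have hu0 : 0 ≤ (x + y) % m := Int.emod_nonneg _ hmne
    have hum : (x + y) % m < m := Int.emod_lt_of_pos _ hm
    have hlt : ((x + y) % m).toNat < bs.length := by rw [hb]; omega
    rw [List.foldl_cons, ih _ (by rw [pvAddAt_length]; exact hb),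
        pvAddAt_eq _ _ _ hu0 hlt, pvGetD_set]
    have hcp : pvCP m (y :: ys) x t
        = pvCP m ys x t + (if (x + y) % m == t then 1 else 0) := by
      unfold pvCP
      by_cases h : ((x + y) % m == t) = true <;> simp [h]
    rw [hcp]
    by_cases heq : (x + y) % m = t
    · have htn : t.toNat = ((x + y) % m).toNat := by omega
      rw [if_pos ⟨htn, hlt⟩, if_pos (by simp [heq]), htn]
      ring
    · have hne : ¬(t.toNat = ((x + y) % m).toNat ∧ ((x + y) % m).toNat < bs.length) := by
        intro h
        exact heq (by omega)
      rw [if_neg hne, if_neg (by simp [heq])]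
      ring

-- A-side: the fold over combinations basket 2
lemma a_basket {m : Int} (hm : 0 < m) {t : Int} (ht0 : 0 ≤ t) (ht : t < m) :
    ∀ (basket : List Int) (bs : List Int), bs.length = m.toNat →
      (stA m bs basket).getD t.toNat 0 = bs.getD t.toNat 0 + pvN m basket t := by
  intro basket
  induction basket with
  | nil =>
    intro bs hb
    simp [stA, PySem.List.combinations_nil_succ, pvN]
  | cons x xs ih =>
    intro bs hb
    unfold stA
    rw [PySem.List.combinations_cons_succ, PySem.List.combinations_one, List.foldl_append,
        List.map_map, List.foldl_map]
    have hstep : ∀ (b : List Int) (y : Int),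
        (fun b c =>
          match c with
          | [i, j] => pvAddAt b ((i + j) % m) 1
          | _ => b) b (((fun c => x :: c) ∘ fun x => [x]) y) = pvAddAt b ((x + y) % m) 1 := by
      intro b y; rfl
    rw [PySem.List.foldl_congr_mem _ _ _ _ (fun b y _ => hstep b y)]
    have hlen : (xs.foldl (fun b y => pvAddAt b ((x + y) % m) 1) bs).length = m.toNat := by
      rw [pvFoldLen _ _ (fun b y => pvAddAt_length b _ _) bs]; exact hb
    have := ih (xs.foldl (fun b y => pvAddAt b ((x + y) % m) 1) bs) hlen
    unfold stA at this
    rw [this, a_inner hm ht0 ht x xs bs hb]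
    simp [pvN]
    ring

lemma pvStepA_len (g : Int → Int → Int) (b c : List Int) :
    (match c with
      | [i, j] => pvAddAt b (g i j) 1
      | _ => b).length = b.length := by
  match c with
  | [] => rfl
  | [_] => rfl
  | [i, j] => exact pvAddAt_length b _ _
  | _ :: _ :: _ :: _ => rfl

lemma stA_len (m : Int) (bs basket : List Int) : (stA m bs basket).length = bs.length := by
  unfold stA
  exact pvFoldLen _ _ (fun b c => pvStepA_len (fun i j => (i + j) % m) b c) bs

-- the two per-basket steps agree
-- a delta-sum over a nodup list
lemma sum_delta (u : Int) (f : Int → Int) :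
    ∀ (l : List Int), l.Nodup →
      (l.map (fun k => if k = u then f k else 0)).sum = if u ∈ l then f u else 0 := by
  intro l
  induction l with
  | nil => intro _; simp
  | cons k ks ih =>
    intro hnd
    obtain ⟨hnm, hnd'⟩ := List.nodup_cons.mp hnd
    rw [List.map_cons, List.sum_cons, ih hnd']
    by_cases hk : k = u
    · subst hk
      rw [if_pos rfl, if_neg hnm, if_pos List.mem_cons_self]
      ring
    · rw [if_neg hk]
      by_cases hu : u ∈ ks
      · rw [if_pos hu, if_pos (List.mem_cons_of_mem _ hu), zero_add]
      · rw [if_neg hu, zero_add, if_neg (by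
          intro h
          rcases List.mem_cons.mp h with h | h
          · exact hk h.symm
          · exact hu h)]

lemma sum_map_add (l : List Int) (g k : Int → Int) :
    (l.map (fun x => g x + k x)).sum = (l.map g).sum + (l.map k).sum := by
  induction l with
  | nil => simp
  | cons x xs ih => simp [ih]; ring

-- grouping a sum over elements by their residue class
-- a 0/1-indicator sum is a countP
lemma sum_ite_count (p : Int → Bool) :
    ∀ (l : List Int), (l.map (fun v => if p v then (1 : Int) else 0)).sum = (l.countP p : Int) := by
  intro l
  induction l with
  | nil => simp
  | cons x xs ih =>
    rw [List.map_cons, List.sum_cons, ih, List.countP_cons]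
    by_cases h : p x = true <;> simp [h] <;> ring

-- ordered pairs (with repetition of indices) = 2 · unordered distinct pairs + self-pairs
lemma ord_eq {m : Int} {t : Int} :
    ∀ (basket : List Int),
      (basket.map (fun v => pvCP m basket v t)).sum
        = 2 * pvN m basket t + pvSelf m basket t := by
  intro basket
  induction basket with
  | nil => simp [pvN, pvSelf]
  | cons x xs ih =>
    have hcp : ∀ w, pvCP m (x :: xs) w t
        = pvCP m xs w t + (if (w + x) % m == t then 1 else 0) := by
      intro w
      unfold pvCP
      rw [List.countP_cons]
      by_cases h : ((w + x) % m == t) = true <;> simp [h]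
    rw [List.map_cons, List.sum_cons, hcp x]
    have hmap : (xs.map (fun v => pvCP m (x :: xs) v t)).sum
        = (xs.map (fun v => pvCP m xs v t)).sum
          + (xs.map (fun v => if (v + x) % m == t then (1 : Int) else 0)).sum := by
      rw [← sum_map_add, List.map_congr_left (fun v _ => hcp v)]
    rw [hmap, ih, sum_ite_count (fun v => (v + x) % m == t) xs]
    have hsum : (xs.countP (fun v => (v + x) % m == t) : Int) = pvCP m xs x t := by
      unfold pvCP
      congr 1
      refine List.countP_congr (fun v _ => ?_)
      simp only [beq_iff_eq]
      rw [add_comm v x]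
    have hself : pvSelf m (x :: xs) t
        = pvSelf m xs t + (if (x + x) % m == t then 1 else 0) := by
      unfold pvSelf
      rw [List.countP_cons]
      have : 2 * x = x + x := by ring
      by_cases h : ((x + x) % m == t) = true <;> simp [this, h]
    rw [hsum, hself, show pvN m (x :: xs) t = pvCP m xs x t + pvN m xs t from rfl]
    ring

-- generic helpers for sums over (key, count) items
lemma sum_map_mul_left (c : Int) {α : Type} (l : List α) (f : α → Int) :
    (l.map (fun x => c * f x)).sum = c * (l.map f).sum := by
  induction l with
  | nil => simp
  | cons x xs ih => simp [ih]; ring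

lemma sum_map_add_pair (l : List (Int × Int)) (g k : Int × Int → Int) :
    (l.map (fun x => g x + k x)).sum = (l.map g).sum + (l.map k).sum := by
  induction l with
  | nil => simp
  | cons x xs ih => simp [ih]; ring

-- sums over the items of a counter collapse to sums over the underlying list
lemma gen_group (f : Int → Int) (K : List Int) (hK : K.Nodup) :
    ∀ (rs : List Int), (∀ x ∈ rs, x ∈ K) →
      (K.map (fun k => (rs.count k : Int) * f k)).sum = (rs.map f).sum := by
  intro rs
  induction rs with
  | nil => intro _; simp
  | cons v vs ih =>
    intro hmem
    have hsplit : ∀ k : Int, ((v :: vs).count k : Int) * f k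
        = (vs.count k : Int) * f k + (if k = v then f k else 0) := by
      intro k
      rw [List.count_cons]
      push_cast
      by_cases h : k = v
      · simp [h]
        ring
      · simp [h, Ne.symm h]
    rw [List.map_congr_left (fun k _ => hsplit k),
        sum_map_add K (fun k => (vs.count k : Int) * f k) (fun k => if k = v then f k else 0),
        sum_delta v f K hK, if_pos (hmem v List.mem_cons_self),
        ih (fun x hx => hmem x (List.mem_cons_of_mem _ hx)), List.map_cons, List.sum_cons]
    ring

lemma itemsum (f : Int → Int) (rs : List Int) :
    (((PySem.Dict.counter rs).items).map (fun p => p.2 * f p.1)).sum = (rs.map f).sum := by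
  rw [PySem.Dict.items_counter, List.map_map]
  have : ((fun p : Int × Int => p.2 * f p.1) ∘ fun k => (k, (rs.count k : Int)))
      = fun k => (rs.count k : Int) * f k := rfl
  rw [this]
  exact gen_group f _ (PySem.Set.nodup_ofList rs) rs
    (fun x hx => (PySem.Set.mem_ofList rs x).mpr hx)

lemma ite_count_form (c : Prop) [Decidable c] (x : Int) :
    (if c then x else 0) = x * (if c then (1 : Int) else 0) := by
  by_cases h : c <;> simp [h]

-- the pieces of pvPairsLoop's contribution
def pvF (m t a : Int) (L : List (Int × Int)) : Int :=
  (L.map (fun q => if (a + q.1) % m == t then q.2 else 0)).sum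
def pvSitems (m t : Int) (L : List (Int × Int)) : Int :=
  (L.map (fun p => if (2 * p.1) % m == t then p.2 else 0)).sum
def pvOV (m t : Int) (L : List (Int × Int)) : Int :=
  (L.map (fun p => p.2 * pvF m t p.1 L)).sum
def pvV (m : Int) : List (Int × Int) → Int → Int
  | [], _ => 0
  | (a, ca) :: rest, t =>
      (if (2 * a) % m == t then ca * (ca - 1) / 2 else 0)
      + (rest.map (fun q => if (a + q.1) % m == t then ca * q.2 else 0)).sum
      + pvV m rest t

lemma pvF_cons (m t x a ca : Int) (rest : List (Int × Int)) :
    pvF m t x ((a, ca) :: rest) = (if (x + a) % m == t then ca else 0) + pvF m t x rest := by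
  simp [pvF]

lemma ov_rec (m t a ca : Int) (rest : List (Int × Int)) :
    pvOV m t ((a, ca) :: rest)
      = (if (2 * a) % m == t then ca * ca else 0) + 2 * (ca * pvF m t a rest)
        + pvOV m t rest := by
  unfold pvOV
  rw [List.map_cons, List.sum_cons]
  have htail : ∀ p ∈ rest, p.2 * pvF m t p.1 ((a, ca) :: rest)
      = ca * (if (a + p.1) % m == t then p.2 else 0) + p.2 * pvF m t p.1 rest := by
    intro p _
    rw [pvF_cons, show (p.1 + a) % m = (a + p.1) % m from by rw [add_comm]]
    by_cases h : ((a + p.1) % m == t) = true <;> simp [h] <;> ring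
  rw [List.map_congr_left htail,
      sum_map_add_pair rest (fun p => ca * (if (a + p.1) % m == t then p.2 else 0))
        (fun p => p.2 * pvF m t p.1 rest),
      sum_map_mul_left ca rest (fun p => if (a + p.1) % m == t then p.2 else 0),
      pvF_cons, show (a + a) % m = (2 * a) % m from by ring_nf]
  show ca * ((if (2 * a) % m == t then ca else 0) + pvF m t a rest) + _ = _
  by_cases h : ((2 * a) % m == t) = true <;> simp [h, pvF] <;> ring

lemma twoV (m t : Int) : ∀ (L : List (Int × Int)),
    pvOV m t L = 2 * pvV m L t + pvSitems m t L := by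
  intro L
  induction L with
  | nil => simp [pvOV, pvV, pvSitems]
  | cons p rest ih =>
    obtain ⟨a, ca⟩ := p
    rw [ov_rec, ih]
    have hdiag : (if (2 * a) % m == t then ca * ca else 0)
        = 2 * (if (2 * a) % m == t then ca * (ca - 1) / 2 else 0)
          + (if (2 * a) % m == t then ca else 0) := by
      by_cases h : ((2 * a) % m == t) = true
      · simp only [h, if_true]
        have heven : Even (ca * (ca - 1)) := by
          have h1 := Int.even_mul_succ_self (ca - 1)
          have h2 : (ca - 1) * (ca - 1 + 1) = ca * (ca - 1) := by ring
          rwa [h2] at h1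
        have h2 := Int.two_mul_ediv_two_of_even heven
        nlinarith [h2]
      · simp [h]
    have hmid : (rest.map (fun q => if (a + q.1) % m == t then ca * q.2 else 0)).sum
        = ca * pvF m t a rest := by
      rw [show (fun q : Int × Int => if (a + q.1) % m == t then ca * q.2 else 0)
            = fun q => ca * (if (a + q.1) % m == t then q.2 else 0) from by
          funext q
          by_cases h : ((a + q.1) % m == t) = true <;> simp [h],
        sum_map_mul_left ca rest (fun q => if (a + q.1) % m == t then q.2 else 0)]
      rfl
    rw [show pvV m ((a, ca) :: rest) t
          = (if (2 * a) % m == t then ca * (ca - 1) / 2 else 0)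
            + (rest.map (fun q => if (a + q.1) % m == t then ca * q.2 else 0)).sum
            + pvV m rest t from rfl,
        hmid, hdiag,
        show pvSitems m t ((a, ca) :: rest)
          = (if (2 * a) % m == t then ca else 0) + pvSitems m t rest from by
        simp [pvSitems]]
    ring

-- the counter built by B's dict loop
lemma dict_build (m : Int) (basket : List Int) :
    basket.foldl (fun h v => PySem.Dict.modify h (v % m) 0 (· + 1)) PySem.Dict.empty
      = PySem.Dict.counter (basket.map (· % m)) := by
  rw [PySem.Dict.counter_eq_foldl, List.foldl_map]

-- pvV on the items of the residue counter is exactly the pairwise count pvN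
lemma V_eq_N (m t : Int) (basket : List Int) :
    pvV m ((PySem.Dict.counter (basket.map (· % m))).items) t = pvN m basket t := by
  have hmod : ∀ v w : Int, (v % m + w % m) % m = (v + w) % m := by
    intro v w
    conv_rhs => rw [Int.add_emod]
  have hmod2 : ∀ v : Int, (2 * (v % m)) % m = (2 * v) % m := by
    intro v
    conv_rhs => rw [Int.mul_emod]
    rw [Int.mul_emod 2 (v % m) m, Int.emod_emod_of_dvd _ dvd_rfl]
  set rs := basket.map (· % m) with hrs
  set L := (PySem.Dict.counter rs).items with hL
  -- pvSitems = pvSelf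
  have hS : pvSitems m t L = pvSelf m basket t := by
    unfold pvSitems
    rw [List.map_congr_left (fun p (_ : p ∈ L) =>
      ite_count_form (((2 * p.1) % m == t) = true) p.2)]
    rw [itemsum (fun k => if (2 * k) % m == t then (1:Int) else 0) rs,
        sum_ite_count (fun x => (2 * x) % m == t) rs, hrs, List.countP_map]
    unfold pvSelf
    congr 1
    refine List.countP_congr (fun v _ => ?_)
    simp [hmod2 v]
  -- pvF at a residue = pvCP
  have hF : ∀ v : Int, pvF m t (v % m) L = pvCP m basket v t := by
    intro v
    unfold pvF
    rw [List.map_congr_left (fun q (_ : q ∈ L) =>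
      ite_count_form (((v % m + q.1) % m == t) = true) q.2)]
    rw [itemsum (fun k => if (v % m + k) % m == t then (1:Int) else 0) rs,
        sum_ite_count (fun y => (v % m + y) % m == t) rs, hrs, List.countP_map]
    unfold pvCP
    congr 1
    refine List.countP_congr (fun w _ => ?_)
    simp only [Function.comp, beq_iff_eq, hmod v w]
  -- pvOV = the ordered-pair sum
  have hOV : pvOV m t L = 2 * pvN m basket t + pvSelf m basket t := by
    unfold pvOV
    rw [itemsum (fun k => pvF m t k L) rs, hrs, List.map_map]
    rw [List.map_congr_left (fun v (_ : v ∈ basket) =>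
      (by exact hF v : ((fun k => pvF m t k L) ∘ fun x => x % m) v = pvCP m basket v t))]
    exact ord_eq basket
  have h2 := twoV m t L
  rw [hS, hOV] at h2
  omega

-- scattering: the contribution of pvPairsLoop at one bucket
lemma fold_add_getD {m : Int} (hm : 0 < m) {t : Int} (ht0 : 0 ≤ t) (ht : t < m)
    (g w : Int × Int → Int) :
    ∀ (L : List (Int × Int)) (bs : List Int), bs.length = m.toNat →
      (L.foldl (fun b p => pvAddAt b ((g p) % m) (w p)) bs).getD t.toNat 0
        = bs.getD t.toNat 0 + (L.map (fun p => if (g p) % m == t then w p else 0)).sum := by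
  intro L
  induction L with
  | nil => intro bs _; simp
  | cons p L ih =>
    intro bs hb
    have hmne : m ≠ 0 := by omega
    have hi0 : 0 ≤ (g p) % m := Int.emod_nonneg _ hmne
    have him : (g p) % m < m := Int.emod_lt_of_pos _ hm
    rw [List.foldl_cons, ih _ (by rw [pvAddAt_length]; exact hb),
        pvAddAt_eq _ _ _ hi0 (by omega), pvGetD_set, List.map_cons, List.sum_cons]
    by_cases heq : (g p) % m = t
    · rw [if_pos ⟨by omega, by omega⟩, if_pos (by simp [heq]),
          show ((g p) % m).toNat = t.toNat from by omega]
      ring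
    · rw [if_neg (by intro h; exact heq (by omega)), if_neg (by simp [heq])]
      ring

lemma pairsLoop_len (m : Int) : ∀ (L : List (Int × Int)) (tot : List Int),
    (pvPairsLoop m L tot).length = tot.length := by
  intro L
  induction L with
  | nil => intro tot; rfl
  | cons p L ih =>
    obtain ⟨a, ca⟩ := p
    intro tot
    rw [pvPairsLoop, ih,
        pvFoldLen _ _ (fun b q => pvAddAt_length b _ _), pvAddAt_length]

lemma pairs_getD {m : Int} (hm : 0 < m) {t : Int} (ht0 : 0 ≤ t) (ht : t < m) :
    ∀ (L : List (Int × Int)) (tot : List Int), tot.length = m.toNat →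
      (pvPairsLoop m L tot).getD t.toNat 0 = tot.getD t.toNat 0 + pvV m L t := by
  intro L
  induction L with
  | nil => intro tot _; simp [pvPairsLoop, pvV]
  | cons p L ih =>
    obtain ⟨a, ca⟩ := p
    intro tot htot
    have hmne : m ≠ 0 := by omega
    rw [pvPairsLoop]
    simp only [PySem.Int.mod_eq_emod_of_pos hm,
      PySem.Int.floordiv_eq_ediv_of_pos (by norm_num : (0:Int) < 2)]
    have hd0 : 0 ≤ (2 * a) % m := Int.emod_nonneg _ hmne
    have hdm : (2 * a) % m < m := Int.emod_lt_of_pos _ hm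
    have hlen1 : (pvAddAt tot ((2 * a) % m) (ca * (ca - 1) / 2)).length = m.toNat := by
      rw [pvAddAt_length]; exact htot
    have hlen2 : (L.foldl (fun b p => pvAddAt b ((a + p.1) % m) (ca * p.2))
        (pvAddAt tot ((2 * a) % m) (ca * (ca - 1) / 2))).length = m.toNat := by
      rw [pvFoldLen _ _ (fun b q => pvAddAt_length b _ _)]; exact hlen1
    rw [ih _ hlen2,
        fold_add_getD hm ht0 ht (fun p => a + p.1) (fun p => ca * p.2) L _ hlen1,
        pvAddAt_eq _ _ _ hd0 (by omega), pvGetD_set]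
    have hV : pvV m ((a, ca) :: L) t
        = (if (2 * a) % m == t then ca * (ca - 1) / 2 else 0)
          + (L.map (fun q => if (a + q.1) % m == t then ca * q.2 else 0)).sum
          + pvV m L t := rfl
    rw [hV]
    by_cases heq : (2 * a) % m = t
    · rw [if_pos ⟨by omega, by omega⟩, if_pos (by simp [heq]),
          show ((2 * a) % m).toNat = t.toNat from by omega]
      ring
    · rw [if_neg (by intro h; exact heq (by omega)), if_neg (by simp [heq])]
      ring

-- B-side: the whole per-basket step
lemma b_basket {m : Int} (hm : 0 < m) {t : Int} (ht0 : 0 ≤ t) (ht : t < m)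
    (basket : List Int) (tot : List Int) (htot : tot.length = m.toNat) :
    (stB m tot basket).getD t.toNat 0 = tot.getD t.toNat 0 + pvN m basket t := by
  unfold stB
  simp only [PySem.Int.mod_eq_emod_of_pos hm]
  rw [dict_build, pairs_getD hm ht0 ht _ tot htot, V_eq_N]

lemma stB_len (m : Int) (tot basket : List Int) : (stB m tot basket).length = tot.length := by
  unfold stB
  exact pairsLoop_len m _ tot

lemma st_eq {m : Int} (hm : 0 < m) (basket bs : List Int) (hb : bs.length = m.toNat) :
    stA m bs basket = stB m bs basket := by
  have hlenA : (stA m bs basket).length = m.toNat := by rw [stA_len]; exact hb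
  have hlenB : (stB m bs basket).length = m.toNat := by rw [stB_len]; exact hb
  apply List.ext_getElem (by omega)
  intro k hk1 hk2
  have hk : k < m.toNat := by omega
  have ht0 : (0 : Int) ≤ (k : Int) := by positivity
  have htm : (k : Int) < m := by omega
  have hA := a_basket hm ht0 htm basket bs hb
  have hB := b_basket hm ht0 htm basket bs hb
  have hAk : (stA m bs basket).getD k 0 = (stA m bs basket)[k] :=
    List.getD_eq_getElem _ _ (by omega)
  have hBk : (stB m bs basket).getD k 0 = (stB m bs basket)[k] :=
    List.getD_eq_getElem _ _ (by omega)
  have hkk : ((k : Int)).toNat = k := by omega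
  rw [← hAk, ← hBk, ← hkk, hA, hB]

lemma folds_eq {m : Int} (hm : 0 < m) :
    ∀ (baskets : List (List Int)) (bs : List Int), bs.length = m.toNat →
      baskets.foldl (stA m) bs = baskets.foldl (stB m) bs := by
  intro baskets
  induction baskets with
  | nil => intro bs _; rfl
  | cons b rest ih =>
    intro bs hb
    rw [List.foldl_cons, List.foldl_cons, ← st_eq hm b bs hb]
    apply ih
    rw [stA_len]
    exact hb

-- for count_of_bucket ≤ 0 both ports return the empty list
lemma degenerateA (m : Int) (hm : m ≤ 0) (baskets : List (List Int)) (th : Int) :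
    hashing_buckets m baskets th = [] := by
  simp only [hashing_buckets]
  have hlen := pvFoldLen baskets
    (fun bs basket => (PySem.List.combinations basket 2).foldl (fun b c =>
      match c with
      | [i, j] => pvAddAt b (PySem.Int.mod (i + j) m) 1
      | _ => b) bs)
    (fun bs basket => pvFoldLen _ _
      (fun b c => pvStepA_len (fun i j => PySem.Int.mod (i + j) m) b c) bs)
    (List.replicate m.toNat 0)
  have hnil : baskets.foldl (fun bs basket => (PySem.List.combinations basket 2).foldl (fun b c =>
      match c with
      | [i, j] => pvAddAt b (PySem.Int.mod (i + j) m) 1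
      | _ => b) bs) (List.replicate m.toNat 0) = [] := by
    apply List.eq_nil_of_length_eq_zero
    rw [hlen]
    simp
    omega
  rw [hnil]
  rfl

lemma degenerateB (m : Int) (hm : m ≤ 0) (baskets : List (List Int)) (th : Int) :
    hashing_buckets_alt m baskets th = [] := by
  simp only [hashing_buckets_alt]
  have hnil : ∀ (L : List (Int × Int)), pvPairsLoop m L [] = [] := by
    intro L
    have := pairsLoop_len m L []
    exact List.eq_nil_of_length_eq_zero (by rw [this]; rfl)
  have hfold : ∀ (bl : List (List Int)),
      bl.foldl (fun buckets basket =>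
        pvPairsLoop m
          (PySem.Dict.items (basket.foldl
            (fun h v => PySem.Dict.modify h (PySem.Int.mod v m) 0 (· + 1))
            PySem.Dict.empty))
          buckets) [] = [] := by
    intro bl
    induction bl with
    | nil => rfl
    | cons b rest ih => rw [List.foldl_cons, hnil]; exact ih
  rw [show (List.replicate m.toNat (0 : Int)) = [] from by simp; omega, hfold]
  rfl

-- ===== VERDICT (by name: the statement is the Claim_ definition above) =====
theorem hashing_buckets_spec : Claim_equal_hashing_buckets := by
  unfold Claim_equal_hashing_buckets
  intro m baskets th _ hpre
  unfold Spec_hashing_buckets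
  rcases hpre with hm | ⟨hm, -⟩
  · simp only [hashing_buckets, hashing_buckets_alt]
    have hfA : (fun bs basket =>
        (PySem.List.combinations basket 2).foldl (fun b c =>
          match c with
          | [i, j] => pvAddAt b (PySem.Int.mod (i + j) m) 1
          | _ => b) bs) = fun bs basket => stA m bs basket := by
      funext bs basket
      unfold stA
      simp only [PySem.Int.mod_eq_emod_of_pos hm]
    have hfB : (fun (buckets : List Int) (basket : List Int) =>
        pvPairsLoop m
          (PySem.Dict.items (basket.foldl
            (fun h v => PySem.Dict.modify h (PySem.Int.mod v m) 0 (· + 1))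
            PySem.Dict.empty))
          buckets) = fun tot basket => stB m tot basket := by
      funext tot basket; rfl
    rw [hfA, hfB, folds_eq hm baskets _ (by simp)]
  · rw [degenerateA m hm baskets th, degenerateB m hm baskets th]
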